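-- pv_equiv track=rewrite | github.com/syncerpn/leetcode | 3856_trim_trailing_vowels.py | trimTrailingVowels
-- ===== SOURCE A (Python) =====
-- def trimTrailingVowels(s: str) -> str:
--     V = {"a", "e", "i", "o", "u"}
--     r = len(s) - 1
--     while r >= 0:
--         if s[r] not in V:
--             break
--         r -= 1
--
--
--     return s[:r+1]
-- ===== SOURCE B (Python) =====
-- def trimTrailingVowels(s: str) -> str:
--     if s and s[-1] in "aeiou":
--         return trimTrailingVowels(s[:-1])
--     return s
-- ===== Notes on version B (the rewrite author's own statement) =====
-- stated objective: simpler
-- what changed: Replaced the explicit backward index walk plus final slice with a direct recursion that peels the last character while it is a vowel.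
import Mathlib
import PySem

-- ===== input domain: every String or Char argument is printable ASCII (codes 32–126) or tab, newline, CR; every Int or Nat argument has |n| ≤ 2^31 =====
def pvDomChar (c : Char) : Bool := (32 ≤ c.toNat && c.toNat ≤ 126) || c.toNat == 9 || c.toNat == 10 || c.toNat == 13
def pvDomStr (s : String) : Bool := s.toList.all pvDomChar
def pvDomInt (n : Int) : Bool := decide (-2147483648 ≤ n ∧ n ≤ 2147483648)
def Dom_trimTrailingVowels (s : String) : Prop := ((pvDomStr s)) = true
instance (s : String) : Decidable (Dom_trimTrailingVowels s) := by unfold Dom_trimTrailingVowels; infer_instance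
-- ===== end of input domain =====

-- B replaces A's backward index walk + final slice by a direct recursion peeling the last
-- character while it is a vowel (simpler decomposition; same return value).

-- ===== PORT A =====
-- V = {"a","e","i","o","u"} (a Python set of 1-char strings; membership of s[r] tested per char)
def pvVowelSet : PySem.Set Char := PySem.Set.ofList ['a', 'e', 'i', 'o', 'u']

-- the while loop: while r >= 0: if s[r] not in V: break; r -= 1
def pvTrimLoop (l : List Char) (r : Int) : Int :=
  if h : 0 ≤ r then
    if PySem.List.pyGetD l r ' ' ∉ pvVowelSet then r
    else pvTrimLoop l (r - 1)
  else r
termination_by (r + 1).toNat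
decreasing_by omega

def trimTrailingVowels (s : String) : String :=
  -- l := s.toList; r := loop result; return s[:r+1]
  String.ofList (PySem.List.slice s.toList none
    (some (pvTrimLoop s.toList ((s.toList.length : Int) - 1) + 1)))

-- ===== PORT B =====
-- if s and s[-1] in "aeiou": return trimTrailingVowels(s[:-1]); return s
def pvAltGo (l : List Char) : List Char :=
  if h : l ≠ [] ∧ PySem.List.pyGetD l (-1) ' ' ∈ ['a', 'e', 'i', 'o', 'u'] then
    pvAltGo (PySem.List.slice l none (some (-1)))
  else l
termination_by l.length
decreasing_by
  simp only [PySem.List.slice_to_neg_one]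
  have := h.1
  cases l with
  | nil => exact absurd rfl this
  | cons a t => simp

def trimTrailingVowels_alt (s : String) : String := String.ofList (pvAltGo s.toList)

-- ===== PRECONDITION & SPEC =====
def Spec_trimTrailingVowels (s : String) (out : String) : Prop := out = trimTrailingVowels_alt s
instance (s : String) (out : String) : Decidable (Spec_trimTrailingVowels s out) := by unfold Spec_trimTrailingVowels; infer_instance

-- ===== CLAIM (what is proved, stated in full; the proofs are below) =====
def Claim_equal_trimTrailingVowels : Prop := ∀ (s : String), Dom_trimTrailingVowels s → Spec_trimTrailingVowels s (trimTrailingVowels s)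

-- ===== LEMMAS AND PROOFS =====

def pvIsV (c : Char) : Bool := decide (c ∈ pvVowelSet)

lemma pvAltGo_reverse (m : List Char) :
    pvAltGo m.reverse = (m.dropWhile pvIsV).reverse := by
  induction m with
  | nil => simp [pvAltGo]
  | cons c t ih =>
      rw [pvAltGo]
      have hne : t.reverse ++ [c] ≠ [] := by simp
      have hget : PySem.List.pyGetD (t.reverse ++ [c]) (-1) ' ' = c :=
        PySem.List.pyGetD_neg_one_append_singleton t.reverse c ' '
      by_cases hv : c ∈ pvVowelSet
      · have hv' : c ∈ (['a', 'e', 'i', 'o', 'u'] : List Char) := hv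
        simp only [List.reverse_cons, hget, dif_pos (And.intro hne hv'),
          PySem.List.slice_to_neg_one, List.dropLast_concat]
        rw [ih, List.dropWhile_cons_of_pos (by simp [pvIsV, hv])]
      · have hv' : c ∉ (['a', 'e', 'i', 'o', 'u'] : List Char) := hv
        simp only [List.reverse_cons, hget]
        rw [dif_neg (by intro h; exact hv' h.2)]
        rw [List.dropWhile_cons_of_neg (by simp [pvIsV, hv]), List.reverse_cons]

lemma pvTrimLoop_reverse (m : List Char) (q : List Char) :
    pvTrimLoop (m.reverse ++ q) ((m.length : Int) - 1)
      = ((m.dropWhile pvIsV).length : Int) - 1 := by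
  induction m generalizing q with
  | nil => rw [pvTrimLoop]; simp
  | cons c t ih =>
      have hr : ((c :: t).length : Int) - 1 = (t.length : Int) := by simp
      rw [pvTrimLoop, hr]
      rw [dif_pos (Int.natCast_nonneg _)]
      have hget : PySem.List.pyGetD ((c :: t).reverse ++ q) ((t.length : Int)) ' ' = c := by
        rw [List.reverse_cons, List.append_assoc, PySem.List.pyGetD_natCast]
        simp [List.getD]
      by_cases hv : c ∈ pvVowelSet
      · rw [hget, if_neg (by simp [hv])]
        have hlist : (c :: t).reverse ++ q = t.reverse ++ ([c] ++ q) := by simp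
        rw [hlist, ih ([c] ++ q), List.dropWhile_cons_of_pos (by simp [pvIsV, hv])]
      · rw [hget, if_pos (by simp [hv])]
        rw [List.dropWhile_cons_of_neg (by simp [pvIsV, hv])]
        simp

lemma pv_main (s : String) : trimTrailingVowels_alt s = trimTrailingVowels s := by
  unfold trimTrailingVowels trimTrailingVowels_alt
  have hl : s.toList = s.toList.reverse.reverse := (List.reverse_reverse s.toList).symm
  set m := s.toList.reverse with hm
  have hloop := pvTrimLoop_reverse m []
  rw [List.append_nil] at hloop
  rw [hl]
  rw [pvAltGo_reverse m]
  have hlen : (m.reverse.length : Int) - 1 = (m.length : Int) - 1 := by simp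
  rw [hlen, hloop]
  have harg : ((m.dropWhile pvIsV).length : Int) - 1 + 1 = ((m.dropWhile pvIsV).length : Int) := by ring
  rw [harg, PySem.List.slice_to_natCast]
  have hsplit : m.reverse = (m.dropWhile pvIsV).reverse ++ (m.takeWhile pvIsV).reverse := by
    rw [← List.reverse_append, List.takeWhile_append_dropWhile]
  rw [hsplit]
  have hlr : (m.dropWhile pvIsV).length = (m.dropWhile pvIsV).reverse.length := by simp
  rw [hlr, List.take_left]

-- ===== VERDICT (by name: the statement is the Claim_ definition above) =====
theorem trimTrailingVowels_spec : Claim_equal_trimTrailingVowels := by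
  intro s _
  unfold Spec_trimTrailingVowels
  exact (pv_main s).symm
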